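-- pv_equiv track=rewrite | github.com/Jevaa-kharthik/Interview_Preparation | Soti_Interview_2.py | find_largest_square_area
-- ===== SOURCE A (Python) =====
-- def find_largest_square_area(A):
--     n = len(A)
--     max_square_size = 0
--
--     # DP table to store the length of repeated subarrays
--     dp = [[0] * (n + 1) for _ in range(n + 1)]
--
--     # Build the DP table
--     for i in range(1, n + 1):
--         for j in range(i + 1, n + 1):
--             if A[i - 1] == A[j - 1]:
--                 dp[i][j] = dp[i - 1][j - 1] + 1
--                 current_square_size = min(dp[i][j], j - i)
--                 max_square_size = max(max_square_size, current_square_size)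
--
--     # Return the area of the largest square
--     return max_square_size * max_square_size
-- ===== SOURCE B (Python) =====
-- def find_largest_square_area(A):
--     # Diagonal run-length scan: for each offset d, track the current run of
--     # positions k with A[k] == A[k-d]; candidate side = min(run, d).
--     # No O(n^2) DP table is materialised.
--     n = len(A)
--     best = 0
--     for d in range(1, n):
--         run = 0
--         for k in range(d, n):
--             if A[k] == A[k - d]:
--                 run += 1
--             else:
--                 run = 0
--             best = max(best, min(run, d))
--     return best * best
-- ===== Notes on version B (the rewrite author's own statement) =====
-- stated objective: alternative
-- what changed: A fills an (n+1)x(n+1) DP table row by row and reads dp[i-1][j-1]; B keeps no table at all: for each offset d it scans the single diagonal j-i=d left to right, maintaining only the current run length of positions with A[k]==A[k-d] and taking max(best, min(run, d)) - same O(n^2) time, O(1) extra memory instead of O(n^2).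
import Mathlib
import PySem

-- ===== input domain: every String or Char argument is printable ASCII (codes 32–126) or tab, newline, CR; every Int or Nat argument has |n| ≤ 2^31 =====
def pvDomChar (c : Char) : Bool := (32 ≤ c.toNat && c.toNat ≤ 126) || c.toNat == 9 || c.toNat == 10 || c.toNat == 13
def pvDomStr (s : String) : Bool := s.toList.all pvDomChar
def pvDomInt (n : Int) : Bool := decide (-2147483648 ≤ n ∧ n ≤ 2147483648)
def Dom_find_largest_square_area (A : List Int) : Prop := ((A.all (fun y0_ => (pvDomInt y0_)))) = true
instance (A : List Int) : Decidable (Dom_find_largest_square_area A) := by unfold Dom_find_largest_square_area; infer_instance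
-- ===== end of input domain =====

-- B replaces A's O(n^2)-memory DP table with a per-offset run-length scan over each
-- diagonal (same O(n^2) time, O(1) extra memory); proved to return A's exact value.


-- ===== PORT A =====
-- dp[i][j] read / write (the Python indices are always in range; pyGetD/pySetD are
-- the total forms of those always-in-range accesses)
def dpGet (dp : List (List Int)) (i j : Int) : Int :=
  PySem.List.pyGetD (PySem.List.pyGetD dp i []) j 0

def dpSet (dp : List (List Int)) (i j : Int) (v : Int) : List (List Int) :=
  PySem.List.pySetD dp i (PySem.List.pySetD (PySem.List.pyGetD dp i []) j v)

-- body of A's inner 'for j' loop; state = (dp, max_square_size)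
def stepA (A : List Int) (i : Int) (st : List (List Int) × Int) (j : Int) :
    List (List Int) × Int :=
  if PySem.List.pyGetD A (i - 1) 0 = PySem.List.pyGetD A (j - 1) 0 then
    let v := dpGet st.1 (i - 1) (j - 1) + 1            -- dp[i][j] = dp[i-1][j-1] + 1
    (dpSet st.1 i j v, max st.2 (min v (j - i)))       -- min(dp[i][j], j - i); running max
  else st

def find_largest_square_area (A : List Int) : Int :=
  let n : Int := A.length
  let dp : List (List Int) :=
    (PySem.List.pyRange 0 (n + 1) 1).map (fun _ => List.replicate (n + 1).toNat (0 : Int))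
  let st :=
    (PySem.List.pyRange 1 (n + 1) 1).foldl
      (fun st i => (PySem.List.pyRange (i + 1) (n + 1) 1).foldl (stepA A i) st)
      (dp, 0)
  st.2 * st.2

-- ===== PORT B =====
-- body of B's inner 'for k' loop; state = (run, best)
def stepB (A : List Int) (d : Int) (st : Int × Int) (k : Int) : Int × Int :=
  let run := if PySem.List.pyGetD A k 0 = PySem.List.pyGetD A (k - d) 0 then st.1 + 1 else 0
  (run, max st.2 (min run d))

def find_largest_square_area_alt (A : List Int) : Int :=
  let n : Int := A.length
  let best :=
    (PySem.List.pyRange 1 n 1).foldl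
      (fun best d => ((PySem.List.pyRange d n 1).foldl (stepB A d) (0, best)).2) 0
  best * best

-- ===== PRECONDITION & SPEC =====
def Spec_find_largest_square_area (A : List Int) (out : Int) : Prop := out = find_largest_square_area_alt A
instance (A : List Int) (out : Int) : Decidable (Spec_find_largest_square_area A out) := by unfold Spec_find_largest_square_area; infer_instance

-- ===== CLAIM (what is proved, stated in full; the proofs are below) =====
def Claim_equal_find_largest_square_area : Prop := ∀ (A : List Int), Dom_find_largest_square_area A → Spec_find_largest_square_area A (find_largest_square_area A)

-- ===== LEMMAS AND PROOFS =====

-- dp[i][j] of A's DP table, as a recursive function: the length of the common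
-- suffix of A[:i] and A[:j] that A's recurrence computes (1-based i < j).
def gfun (A : List Int) : Nat → Nat → Int
  | 0, _ => 0
  | (i+1), j => if A.getD i 0 = A.getD (j-1) 0 then gfun A i (j-1) + 1 else 0

-- the candidate value A and B both take the max of, for the pair (i, j), i < j
def mval (A : List Int) (p : Nat × Nat) : Int :=
  min (gfun A p.1 p.2) ((p.2 : Int) - (p.1 : Int))

-- the pairs 1 ≤ i < j ≤ n in A's (row-major) order
def rowPairs (n : Nat) : List (Nat × Nat) :=
  (List.range' 1 n).flatMap (fun i => (List.range' (i+1) (n - i)).map (fun j => (i, j)))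

-- the same pairs in B's (diagonal-major) order: i = k-d+1, j = k+1
def diagPairs (n : Nat) : List (Nat × Nat) :=
  (List.range' 1 (n-1)).flatMap (fun d => (List.range' d (n - d)).map (fun k => (k - d + 1, k + 1)))

def entry (dp : List (List Int)) (r c : Nat) : Int := (dp.getD r []).getD c 0

def DpLen (A : List Int) (dp : List (List Int)) : Prop :=
  dp.length = A.length + 1 ∧ ∀ r : Nat, r ≤ A.length → (dp.getD r []).length = A.length + 1

lemma pyRangeN (a b : Nat) :
    PySem.List.pyRange (a : Int) (b : Int) 1 = (List.range' a (b - a)).map (fun k : Nat => (k : Int)) := by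
  rw [PySem.List.pyRange_one]
  have h : ((b : Int) - (a : Int)).toNat = b - a := by omega
  rw [h, List.range'_eq_map_range, List.map_map]
  exact List.map_congr_left (fun x _ => by simp only [Function.comp_apply]; push_cast; ring)

lemma pr1 (b : Nat) :
    PySem.List.pyRange 1 ((b : Int) + 1) 1 = (List.range' 1 b).map (fun k : Nat => (k : Int)) := by
  have h := pyRangeN 1 (b + 1)
  push_cast at h
  simpa using h

lemma pr2 (a b : Nat) :
    PySem.List.pyRange ((a : Int) + 1) ((b : Int) + 1) 1
      = (List.range' (a+1) (b - a)).map (fun k : Nat => (k : Int)) := by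
  have h := pyRangeN (a + 1) (b + 1)
  push_cast at h
  rw [h]

lemma pr3 (b : Nat) :
    PySem.List.pyRange 1 (b : Int) 1 = (List.range' 1 (b - 1)).map (fun k : Nat => (k : Int)) := by
  have h := pyRangeN 1 b
  push_cast at h
  simpa using h

lemma gfun_eq (A : List Int) (i j : Nat) (h : 1 ≤ i) :
    gfun A i j = if A.getD (i-1) 0 = A.getD (j-1) 0 then gfun A (i-1) (j-1) + 1 else 0 := by
  obtain ⟨m, rfl⟩ : ∃ m, i = m + 1 := ⟨i - 1, by omega⟩
  simp [gfun]

lemma entry_set (dp : List (List Int)) (i j r c : Nat) (v : Int)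
    (hi : i < dp.length) (hj : j < (dp.getD i []).length) :
    entry (dp.set i ((dp.getD i []).set j v)) r c
      = if r = i ∧ c = j then v else entry dp r c := by
  unfold entry
  rcases eq_or_ne r i with rfl | hr
  · have hrow : (dp.set r ((dp.getD r []).set j v)).getD r [] = (dp.getD r []).set j v := by
      simp [List.getD_eq_getElem?_getD, hi]
    rw [hrow]
    rcases eq_or_ne c j with rfl | hc
    · rw [List.getD_eq_getElem?_getD, List.getElem?_set]
      rw [List.getD_eq_getElem?_getD] at hj
      simp [hj]
    · have hjc : j ≠ c := Ne.symm hc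
      rw [List.getD_eq_getElem?_getD, List.getElem?_set, if_neg hjc,
          ← List.getD_eq_getElem?_getD, if_neg (by tauto)]
  · have hir : i ≠ r := Ne.symm hr
    have hrow : (dp.set i ((dp.getD i []).set j v)).getD r [] = dp.getD r [] := by
      rw [List.getD_eq_getElem?_getD, List.getElem?_set, if_neg hir,
          ← List.getD_eq_getElem?_getD]
    rw [hrow, if_neg (by tauto)]

lemma DpLen_set (A : List Int) (dp : List (List Int)) (hlen : DpLen A dp)
    (i j : Nat) (v : Int) (hi : i ≤ A.length) :
    DpLen A (dp.set i ((dp.getD i []).set j v)) := by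
  obtain ⟨h1, h2⟩ := hlen
  refine ⟨by simp [h1], ?_⟩
  intro r hr
  rcases eq_or_ne i r with rfl | hir
  · have hlt : i < dp.length := by omega
    rw [List.getD_eq_getElem?_getD, List.getElem?_set, if_pos rfl, if_pos hlt]
    simpa using h2 i hi
  · rw [List.getD_eq_getElem?_getD, List.getElem?_set, if_neg hir,
        ← List.getD_eq_getElem?_getD]
    exact h2 r hr

lemma stepA_cast (A : List Int) (i j : Nat) (h1 : 1 ≤ i) (h2 : 1 ≤ j)
    (dp : List (List Int)) (mx : Int) :
    stepA A (i : Int) (dp, mx) (j : Int) =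
      if A.getD (i-1) 0 = A.getD (j-1) 0 then
        (dp.set i ((dp.getD i []).set j (entry dp (i-1) (j-1) + 1)),
         max mx (min (entry dp (i-1) (j-1) + 1) ((j : Int) - (i : Int))))
      else (dp, mx) := by
  have e1 : (i : Int) - 1 = ((i - 1 : Nat) : Int) := by omega
  have e2 : (j : Int) - 1 = ((j - 1 : Nat) : Int) := by omega
  unfold stepA dpGet dpSet entry
  rw [e1, e2]
  simp only [PySem.List.pyGetD_natCast, PySem.List.pySetD_natCast]

lemma stepB_cast (A : List Int) (d k : Nat) (hd : d ≤ k) (run best : Int) :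
    stepB A (d : Int) (run, best) (k : Int) =
      ((if A.getD k 0 = A.getD (k-d) 0 then run + 1 else 0),
       max best (min (if A.getD k 0 = A.getD (k-d) 0 then run + 1 else 0) (d : Int))) := by
  have e : (k : Int) - (d : Int) = ((k - d : Nat) : Int) := by omega
  unfold stepB
  rw [e]
  simp only [PySem.List.pyGetD_natCast]

-- ===== A side =====
lemma innerA_spec (A : List Int) (i : Nat) (h1 : 1 ≤ i) (h2 : i ≤ A.length) :
    ∀ (len j : Nat) (dp : List (List Int)) (mx : Int),
      j + len = A.length + 1 → i < j → 0 ≤ mx → DpLen A dp →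
      (∀ r c : Nat, r ≤ A.length → c ≤ A.length →
          entry dp r c = if r < i ∧ r < c then gfun A r c
            else if r = i ∧ i < c ∧ c < j then gfun A i c else 0) →
      DpLen A ((List.range' j len).foldl (fun st (jj : Nat) => stepA A (i : Int) st (jj : Int)) (dp, mx)).1 ∧
      0 ≤ ((List.range' j len).foldl (fun st (jj : Nat) => stepA A (i : Int) st (jj : Int)) (dp, mx)).2 ∧
      (∀ r c : Nat, r ≤ A.length → c ≤ A.length →
          entry ((List.range' j len).foldl (fun st (jj : Nat) => stepA A (i : Int) st (jj : Int)) (dp, mx)).1 r c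
            = if r < i ∧ r < c then gfun A r c
              else if r = i ∧ i < c ∧ c < j + len then gfun A i c else 0) ∧
      ((List.range' j len).foldl (fun st (jj : Nat) => stepA A (i : Int) st (jj : Int)) (dp, mx)).2
        = List.foldl max mx ((List.range' j len).map (fun jj => mval A (i, jj))) := by
  intro len
  induction len with
  | zero =>
      intro j dp mx hsum hij hmx hlen hent
      refine ⟨hlen, hmx, ?_, rfl⟩
      intro r c hr hc
      simpa using hent r c hr hc
  | succ m ih =>
      intro j dp mx hsum hij hmx hlen hent
      have hjA : j ≤ A.length := by omega
      rw [List.range'_succ, List.foldl_cons, List.map_cons, List.foldl_cons]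
      rw [stepA_cast A i j h1 (by omega) dp mx]
      by_cases hEq : A.getD (i-1) 0 = A.getD (j-1) 0
      · rw [if_pos hEq]
        have hvi : entry dp (i-1) (j-1) = gfun A (i-1) (j-1) := by
          rw [hent (i-1) (j-1) (by omega) (by omega), if_pos ⟨by omega, by omega⟩]
        have hg : gfun A i j = gfun A (i-1) (j-1) + 1 := by
          rw [gfun_eq A i j h1, if_pos hEq]
        have hmval : min (entry dp (i-1) (j-1) + 1) ((j : Int) - (i : Int)) = mval A (i, j) := by
          show _ = min (gfun A i j) ((j : Int) - (i : Int))
          rw [hvi, ← hg]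
        rw [hmval]
        have hidp : i < dp.length := by rw [hlen.1]; omega
        have hjrow : j < (dp.getD i []).length := by rw [hlen.2 i h2]; omega
        have hlen2 := DpLen_set A dp hlen i j (entry dp (i-1) (j-1) + 1) h2
        have hent2 : ∀ r c : Nat, r ≤ A.length → c ≤ A.length →
            entry (dp.set i ((dp.getD i []).set j (entry dp (i-1) (j-1) + 1))) r c
              = if r < i ∧ r < c then gfun A r c
                else if r = i ∧ i < c ∧ c < j + 1 then gfun A i c else 0 := by
          intro r c hr hc
          rw [entry_set dp i j r c _ hidp hjrow]
          by_cases hrc : r = i ∧ c = j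
          · obtain ⟨h5, h6⟩ := hrc
            subst h5; subst h6
            rw [if_pos ⟨rfl, rfl⟩, hvi, ← hg,
                if_neg (show ¬(r < r ∧ r < c) by omega),
                if_pos ⟨rfl, by omega, by omega⟩]
          · rw [if_neg hrc, hent r c hr hc]
            split_ifs <;> first | rfl | omega
        have hmx2 : (0:Int) ≤ max mx (mval A (i, j)) := le_trans hmx (le_max_left _ _)
        have hres := ih (j+1) (dp.set i ((dp.getD i []).set j (entry dp (i-1) (j-1) + 1)))
          (max mx (mval A (i, j))) (by omega) (by omega) hmx2 hlen2 hent2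
        refine ⟨hres.1, hres.2.1, ?_, ?_⟩
        · intro r c hr hc
          rw [hres.2.2.1 r c hr hc]
          split_ifs <;> first | rfl | omega
        · exact hres.2.2.2
      · rw [if_neg hEq]
        have hg0 : gfun A i j = 0 := by rw [gfun_eq A i j h1, if_neg hEq]
        have hm0 : mval A (i, j) = 0 := by
          show min (gfun A i j) ((j : Int) - (i : Int)) = 0
          rw [hg0]
          exact min_eq_left (by omega)
        have hent2 : ∀ r c : Nat, r ≤ A.length → c ≤ A.length →
            entry dp r c = if r < i ∧ r < c then gfun A r c
              else if r = i ∧ i < c ∧ c < j + 1 then gfun A i c else 0 := by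
          intro r c hr hc
          rw [hent r c hr hc]
          split_ifs with ha hb hc1 <;> try rfl
          all_goals try omega
          · have hri : r = i := by omega
            have hcj : c = j := by omega
            subst hri; subst hcj
            exact hg0.symm
        have hres := ih (j+1) dp mx (by omega) (by omega) hmx hlen hent2
        rw [hm0, max_eq_left hmx]
        refine ⟨hres.1, hres.2.1, ?_, hres.2.2.2⟩
        intro r c hr hc
        rw [hres.2.2.1 r c hr hc]
        split_ifs <;> first | rfl | omega

lemma outerA_spec (A : List Int) :
    ∀ (len i : Nat) (dp : List (List Int)) (mx : Int),
      i + len = A.length + 1 → 1 ≤ i → 0 ≤ mx → DpLen A dp →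
      (∀ r c : Nat, r ≤ A.length → c ≤ A.length →
          entry dp r c = if r < i ∧ r < c then gfun A r c else 0) →
      ((List.range' i len).foldl
          (fun st (ii : Nat) => (List.range' (ii+1) (A.length - ii)).foldl
              (fun st (jj : Nat) => stepA A (ii : Int) st (jj : Int)) st) (dp, mx)).2
        = List.foldl max mx
            (((List.range' i len).flatMap
                (fun ii => (List.range' (ii+1) (A.length - ii)).map (fun j => (ii, j)))).map (mval A)) := by
  intro len
  induction len with
  | zero => intro i dp mx _ _ _ _ _; simp
  | succ m ih =>
      intro i dp mx hsum h1 hmx hlen hent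
      have hin : i ≤ A.length := by omega
      rw [List.range'_succ, List.foldl_cons, List.flatMap_cons, List.map_append, List.foldl_append]
      have hent' : ∀ r c : Nat, r ≤ A.length → c ≤ A.length →
          entry dp r c = if r < i ∧ r < c then gfun A r c
            else if r = i ∧ i < c ∧ c < i + 1 then gfun A i c else 0 := by
        intro r c hr hc
        rw [hent r c hr hc]
        split_ifs <;> first | rfl | omega
      obtain ⟨hlen1, hmx1, hent1, hfold1⟩ :=
        innerA_spec A i h1 hin (A.length - i) (i+1) dp mx (by omega) (by omega) hmx hlen hent'
      have hent1' : ∀ r c : Nat, r ≤ A.length → c ≤ A.length →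
          entry ((List.range' (i+1) (A.length - i)).foldl
              (fun st (jj : Nat) => stepA A (i : Int) st (jj : Int)) (dp, mx)).1 r c
            = if r < i + 1 ∧ r < c then gfun A r c else 0 := by
        intro r c hr hc
        rw [hent1 r c hr hc]
        by_cases h : r < i + 1 ∧ r < c
        · rw [if_pos h]
          rcases Nat.lt_or_ge r i with hri | hri
          · rw [if_pos ⟨hri, h.2⟩]
          · have hrieq : r = i := by omega
            subst hrieq
            rw [if_neg (by omega), if_pos ⟨rfl, by omega, by omega⟩]
        · rw [if_neg h, if_neg (by omega), if_neg (by omega)]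
      have ihres := ih (i+1)
        ((List.range' (i+1) (A.length - i)).foldl
            (fun st (jj : Nat) => stepA A (i : Int) st (jj : Int)) (dp, mx)).1
        ((List.range' (i+1) (A.length - i)).foldl
            (fun st (jj : Nat) => stepA A (i : Int) st (jj : Int)) (dp, mx)).2
        (by omega) (by omega) hmx1 hlen1 hent1'
      rw [Prod.mk.eta] at ihres
      simp only [List.map_map, Function.comp_def] at hfold1 ⊢
      rw [← hfold1]
      exact ihres

lemma map_const_getD {x y : List Int} {l : List Int} (r : Nat) :
    ((l.map (fun _ => x)).getD r y) = if r < l.length then x else y := by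
  rw [List.getD_eq_getElem?_getD, List.getElem?_map]
  rcases Nat.lt_or_ge r l.length with h | h
  · rw [List.getElem?_eq_getElem h]
    simp [h]
  · rw [List.getElem?_eq_none h]
    simp [Nat.not_lt.mpr h]

lemma A_eq (A : List Int) :
    find_largest_square_area A
      = (List.foldl max 0 ((rowPairs A.length).map (mval A)))
        * (List.foldl max 0 ((rowPairs A.length).map (mval A))) := by
  unfold find_largest_square_area
  have ht : ((A.length : Int) + 1).toNat = A.length + 1 := by omega
  simp only [pr1, pr2, List.foldl_map, ht]
  set dp0 : List (List Int) :=
    (PySem.List.pyRange 0 ((A.length : Int) + 1) 1).map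
      (fun _ => List.replicate (A.length + 1) (0 : Int)) with hdp0
  have hlenpy : (PySem.List.pyRange 0 ((A.length : Int) + 1) 1).length = A.length + 1 := by
    rw [PySem.List.length_pyRange_one]
    omega
  have hrow0 : ∀ r : Nat, r ≤ A.length →
      dp0.getD r [] = List.replicate (A.length + 1) (0 : Int) := by
    intro r hr
    rw [hdp0, map_const_getD, hlenpy, if_pos (by omega)]
  have hlen0 : DpLen A dp0 := by
    refine ⟨by rw [hdp0, List.length_map, hlenpy], ?_⟩
    intro r hr
    rw [hrow0 r hr, List.length_replicate]
  have hent0 : ∀ r c : Nat, r ≤ A.length → c ≤ A.length →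
      entry dp0 r c = if r < 1 ∧ r < c then gfun A r c else 0 := by
    intro r c hr hc
    unfold entry
    rw [hrow0 r hr, List.getD_replicate _ (by omega)]
    split_ifs with h
    · obtain ⟨h1, _⟩ := h
      have : r = 0 := by omega
      subst this
      simp [gfun]
    · rfl
  have h := outerA_spec A A.length 1 dp0 0 (by omega) le_rfl le_rfl hlen0 hent0
  unfold rowPairs
  rw [h, List.foldl_map]

-- ===== B side =====
lemma innerB_spec (A : List Int) (d : Nat) :
    ∀ (len k : Nat) (best : Int),
      d ≤ k →
      ((List.range' k len).foldl (fun st (kk : Nat) => stepB A (d : Int) st (kk : Int))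
          (gfun A (k - d) k, best)).2
        = List.foldl max best ((List.range' k len).map (fun kk => mval A (kk - d + 1, kk + 1))) := by
  intro len
  induction len with
  | zero => intro k best _; rfl
  | succ m ih =>
      intro k best hdk
      rw [List.range'_succ, List.foldl_cons, List.map_cons, List.foldl_cons]
      rw [stepB_cast A d k hdk]
      have hrun : (if A.getD k 0 = A.getD (k-d) 0 then gfun A (k - d) k + 1 else 0)
          = gfun A (k - d + 1) (k + 1) := by
        rw [gfun_eq A (k - d + 1) (k + 1) (by omega)]
        simp only [Nat.add_sub_cancel]
        rcases eq_or_ne (A.getD k 0) (A.getD (k-d) 0) with h | h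
        · rw [if_pos h, if_pos h.symm]
        · rw [if_neg h, if_neg (Ne.symm h)]
      have hdint : min (gfun A (k - d + 1) (k + 1)) (d : Int) = mval A (k - d + 1, k + 1) := by
        show _ = min (gfun A (k - d + 1) (k + 1)) (((k + 1 : Nat) : Int) - ((k - d + 1 : Nat) : Int))
        rw [show ((k + 1 : Nat) : Int) - ((k - d + 1 : Nat) : Int) = (d : Int) by omega]
      rw [hrun, hdint]
      have hnext : gfun A (k - d + 1) (k + 1) = gfun A (k + 1 - d) (k + 1) := by
        congr 1
        omega
      rw [hnext]
      exact ih (k+1) (max best (mval A (k - d + 1, k + 1))) (by omega)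

lemma B_eq (A : List Int) :
    find_largest_square_area_alt A
      = (List.foldl max 0 ((diagPairs A.length).map (mval A)))
        * (List.foldl max 0 ((diagPairs A.length).map (mval A))) := by
  unfold find_largest_square_area_alt
  simp only [pr3, List.foldl_map]
  have hbody : ∀ (best : Int), ∀ dd ∈ List.range' 1 (A.length - 1),
      ((PySem.List.pyRange (dd : Int) ((A.length : Int)) 1).foldl (stepB A (dd : Int)) (0, best)).2
        = List.foldl max best ((List.range' dd (A.length - dd)).map (fun kk => mval A (kk - dd + 1, kk + 1))) := by
    intro best dd hdd
    rw [List.mem_range'_1] at hdd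
    rw [pyRangeN, List.foldl_map]
    rw [show (0 : Int) = gfun A (dd - dd) dd by simp [gfun]]
    exact innerB_spec A dd (A.length - dd) dd best le_rfl
  have key : (List.range' 1 (A.length - 1)).foldl
        (fun best (dd : Nat) =>
          ((PySem.List.pyRange (dd : Int) ((A.length : Int)) 1).foldl (stepB A (dd : Int)) (0, best)).2) 0
      = List.foldl max 0 ((diagPairs A.length).map (mval A)) := by
    rw [PySem.List.foldl_congr_mem _ _
        (fun best (dd : Nat) =>
          List.foldl max best ((List.range' dd (A.length - dd)).map (fun kk => mval A (kk - dd + 1, kk + 1))))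
        0 hbody]
    unfold diagPairs
    rw [List.map_flatMap, List.foldl_flatMap]
    congr 1
    funext best dd
    rw [List.map_map]
    rfl
  rw [key, List.foldl_map]

-- ===== permutation =====
lemma mem_rowPairs (n : Nat) (p : Nat × Nat) :
    p ∈ rowPairs n ↔ 1 ≤ p.1 ∧ p.1 < p.2 ∧ p.2 ≤ n := by
  unfold rowPairs
  simp only [List.mem_flatMap, List.mem_map, List.mem_range'_1]
  constructor
  · rintro ⟨i, hi, j, hj, rfl⟩
    exact ⟨by omega, by omega, by omega⟩
  · rintro ⟨ha, hb, hc⟩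
    exact ⟨p.1, ⟨ha, by omega⟩, p.2, ⟨by omega, by omega⟩, rfl⟩

lemma mem_diagPairs (n : Nat) (p : Nat × Nat) :
    p ∈ diagPairs n ↔ 1 ≤ p.1 ∧ p.1 < p.2 ∧ p.2 ≤ n := by
  unfold diagPairs
  simp only [List.mem_flatMap, List.mem_map, List.mem_range'_1]
  obtain ⟨x, y⟩ := p
  constructor
  · rintro ⟨d, hd, k, hk, h⟩
    rw [Prod.mk.injEq] at h
    simp only at *
    omega
  · rintro ⟨ha, hb, hc⟩
    simp only at *
    refine ⟨y - x, by omega, y - 1, by omega, ?_⟩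
    rw [Prod.mk.injEq]
    omega

lemma nodup_rowPairs (n : Nat) : (rowPairs n).Nodup := by
  unfold rowPairs
  rw [List.nodup_flatMap]
  constructor
  · intro i _
    exact (List.nodup_range' 1).map (fun a b h => by simpa using (Prod.mk.injEq _ _ _ _ ▸ h).2)
  · refine (List.nodup_range' 1).imp ?_
    intro a b hab
    intro x hx hy
    simp only [List.mem_map] at hx hy
    obtain ⟨j1, _, rfl⟩ := hx
    obtain ⟨j2, _, h2⟩ := hy
    rw [Prod.mk.injEq] at h2
    exact hab (h2.1.symm)

lemma nodup_diagPairs (n : Nat) : (diagPairs n).Nodup := by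
  unfold diagPairs
  rw [List.nodup_flatMap]
  constructor
  · intro d _
    refine (List.nodup_range' 1).map ?_
    intro a b h
    rw [Prod.mk.injEq] at h
    omega
  · refine (List.nodup_range' 1).imp ?_
    intro a b hab
    intro x hx hy
    simp only [List.mem_map, List.mem_range'_1] at hx hy
    obtain ⟨k1, hk1, rfl⟩ := hx
    obtain ⟨k2, hk2, h2⟩ := hy
    rw [Prod.mk.injEq] at h2
    exact hab (by omega)

lemma perm_pairs (n : Nat) : (rowPairs n).Perm (diagPairs n) := by
  rw [List.perm_ext_iff_of_nodup (nodup_rowPairs n) (nodup_diagPairs n)]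
  intro p
  rw [mem_rowPairs, mem_diagPairs]

-- ===== VERDICT (by name: the statement is the Claim_ definition above) =====
theorem find_largest_square_area_spec : Claim_equal_find_largest_square_area := by
  intro A _
  unfold Spec_find_largest_square_area
  rw [A_eq, B_eq]
  have hperm : ((rowPairs A.length).map (mval A)).Perm ((diagPairs A.length).map (mval A)) :=
    (perm_pairs A.length).map (mval A)
  have hfold := hperm.foldl_eq (f := (max : Int → Int → Int))
    (rcomm := ⟨fun a b c => max_right_comm a b c⟩) 0
  rw [hfold]
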